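-- pv_equiv track=rewrite | github.com/ptitbroussou/HW_QCNN | toolbox.py | QCNN_RBS_based_VQC
-- ===== SOURCE A (Python) =====
-- def QCNN_RBS_based_VQC(I, K):
--     """ I represent the size of the input image. K represents the size of the
--     filter we consider. The stride is always equal to K. Each element of
--     QNN_layer is a list of gates applied in parallel. Param_dictionary is a
--     dictionary that links each gate with the corresponding parameter.
--     RBS_dictionary is a dictionary that links each RBS with its corresponding
--     first qubit of application. """
--     # Connectivity_Graph = QCNN_Connectivity_graph(I)
--     nbr_parameters = int(K * (K - 1))
--     Param_dictionary, RBS_dictionary = {}, {}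
--     QNN_layer = [[] for i in range(2 * K - 3)]
--     # QCNN circuit definition:
--     for index_filter in range((I - K) // K + 1):
--         # For the first half of qubits:
--         PQNN_param_dictionary1, PQNN_dictionary1, PQNN_layer1 = PQNN_building_brick(K * index_filter, K,
--                                                                                     index_filter * (
--                                                                                             nbr_parameters // 2), 0)
--         # For the second half of qubits:
--         PQNN_param_dictionary2, PQNN_dictionary2, PQNN_layer2 = PQNN_building_brick(I + K * index_filter, K,
--                                                                                     (I // K + index_filter) * (
--                                                                                             nbr_parameters // 2),
--                                                                                     (nbr_parameters // 2))
--         # Updating the dictionnaries and the QNN_layers: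
--         RBS_dictionary.update(PQNN_dictionary1)
--         RBS_dictionary.update(PQNN_dictionary2)
--         Param_dictionary.update(PQNN_param_dictionary1)
--         Param_dictionary.update(PQNN_param_dictionary2)
--         for inner_layer_index in range(2 * K - 3):
--             for element_index in range(len(PQNN_layer1[inner_layer_index])):
--                 QNN_layer[inner_layer_index].append(PQNN_layer1[inner_layer_index][element_index])
--                 QNN_layer[inner_layer_index].append(PQNN_layer2[inner_layer_index][element_index])
--     return (QNN_layer, Param_dictionary, RBS_dictionary)
--
-- def PQNN_building_brick(start_qubit, size, index_first_RBS=0, index_first_param=0):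
--     """ This function gives back the QNN corresponding to a PQNN with nearest
--     neighbours connectivity that start on qubit start_qubit. The size of the
--     PQNN is given (nbr of qubits) by the input variable size.
--     The PQNN_param_dictionary gives the corresponding parameters to each RBS. The
--     index_first_RBS is used to named properly the RBS. The
--     PQNN_dictionary is a dictionary that gives the correspondance between the
--     RBS and the corresponding edge in the connectivity graph."""
--     PQNN_param_dictionary, PQNN_dictionary, PQNN_layer = {}, {}, []
--     List_order, List_layer_index = Pyramidal_Order_RBS_gates(size, start_qubit)
--     for index, RBS in enumerate(List_order):
--         PQNN_param_dictionary[index_first_RBS + index] = index_first_param + index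
--         PQNN_dictionary[index_first_RBS + index] = start_qubit + RBS
--     # Definition of the QNN_layers thanks to List_layer_index structure
--     index_RBS = index_first_RBS
--     for layer in List_layer_index:
--         layer_CQNN = []
--         for element in layer:
--             layer_CQNN.append(index_RBS)
--             index_RBS += 1
--         PQNN_layer.append(layer_CQNN)
--     return (PQNN_param_dictionary, PQNN_dictionary, PQNN_layer)
--
-- def Pyramidal_Order_RBS_gates(nbr_qubits, first_RBS=0):
--     """ This function gives the structure of each inner layer in the pyramidal
--     quantum neural network. List_order gives the qubit link to each theta and
--     List_layer_index gives the list of the theta for each inner layer. """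
--     List_layers, List_order, List_layer_index = [], [], []
--     index_RBS = first_RBS
--     # Beginning of the pyramid
--     for i in range(nbr_qubits // 2):
--         list, list_index = [], []
--         for j in range(i + 1):
--             if (i * 2 < (nbr_qubits - 1)):
--                 list.append(j * 2)
--                 list_index.append(index_RBS)
--                 index_RBS += 1
--         if (len(list) > 0):
--             List_layers.append(list)
--             List_layer_index.append(list_index)
--         list, list_index = [], []
--         for j in range(i + 1):
--             if (i * 2 + 1 < (nbr_qubits - 1)):
--                 list.append(j * 2 + 1)
--                 list_index.append(index_RBS)
--                 index_RBS += 1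
--         if (len(list) > 0):
--             List_layers.append(list)
--             List_layer_index.append(list_index)
--     # End of the pyramid
--     for i in range(len(List_layers) - 2, -1, -1):
--         List_layers.append(List_layers[i])
--         list_index = []
--         for j in range(len(List_layers[i])):
--             list_index.append(index_RBS)
--             index_RBS += 1
--         List_layer_index.append(list_index)
--     # Deconcatenate:
--     for i, layer in enumerate(List_layers):
--         List_order += layer
--     return (List_order, List_layer_index)
-- ===== SOURCE B (Python) =====
-- def QCNN_RBS_based_VQC(I, K):
--     """Closed-form construction: each inner layer li has a closed-form shape
--     (start offset, length, qubit parity) given by m = min(li, 2K-4-li); all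
--     three outputs are written by direct index arithmetic from these formulas,
--     with no pyramid build/mirror/renumber stages."""
--     F = (I - K) // K + 1
--     G = (K * (K - 1)) // 2
--     half = I // K
--     layers = []          # (start, length, parity) per inner layer
--     s = 0
--     for li in range(2 * K - 3):
--         m = min(li, 2 * K - 4 - li)
--         layers.append((s, m // 2 + 1, m % 2))
--         s += m // 2 + 1
--     QNN_layer = [[b + st + e
--                   for f in range(F)
--                   for e in range(ln)
--                   for b in (f * G, (half + f) * G)]
--                  for (st, ln, p) in layers]
--     Param_dictionary, RBS_dictionary = {}, {}
--     if F > 0: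
--         qub = [2 * e + p for (st, ln, p) in layers for e in range(ln)]
--         for f in range(F):
--             for r, q in enumerate(qub):
--                 Param_dictionary[f * G + r] = r
--                 RBS_dictionary[f * G + r] = K * f + q
--             for r, q in enumerate(qub):
--                 Param_dictionary[(half + f) * G + r] = G + r
--                 RBS_dictionary[(half + f) * G + r] = I + K * f + q
--     return (QNN_layer, Param_dictionary, RBS_dictionary)
-- ===== Notes on version B (the rewrite author's own statement) =====
-- stated objective: alternative
-- what changed: B replaces A's three-stage pipeline (build the pyramid rows and their mirror by simulation, renumber them into per-brick dictionaries and index layers, then interleave brick1/brick2 by indexing into intermediate lists) with a closed-form construction: each inner layer's shape (start offset, length, qubit parity) is computed directly from m = min(li, 2K-4-li), and QNN_layer, Param_dictionary and RBS_dictionary are all written by direct index arithmetic over these formulas, with no pyramid build/mirror/renumber stages and no per-brick intermediates.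
-- outside the precondition, e.g. on QCNN_RBS_based_VQC(4, 0): A raises ZeroDivisionError, B raises ZeroDivisionError
import Mathlib
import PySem

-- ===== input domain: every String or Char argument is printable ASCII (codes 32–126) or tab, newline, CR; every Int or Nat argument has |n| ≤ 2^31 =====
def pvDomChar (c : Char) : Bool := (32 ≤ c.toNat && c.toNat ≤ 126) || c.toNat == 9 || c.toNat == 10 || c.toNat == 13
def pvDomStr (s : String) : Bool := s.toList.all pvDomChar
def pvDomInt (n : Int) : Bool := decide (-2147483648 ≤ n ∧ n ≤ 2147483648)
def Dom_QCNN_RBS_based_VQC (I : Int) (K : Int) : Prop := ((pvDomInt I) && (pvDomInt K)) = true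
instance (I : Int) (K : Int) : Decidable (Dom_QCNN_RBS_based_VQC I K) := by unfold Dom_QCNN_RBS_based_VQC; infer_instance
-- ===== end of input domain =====

-- B replaces A's three-stage pyramid pipeline (build rows + mirror, renumber into
-- per-brick dictionaries, interleave bricks) by a closed-form construction: each
-- inner layer's shape is (start, length, parity) from m = min(li, 2K-4-li) and all
-- three outputs are written by direct index arithmetic; objective: alternative.

-- ===== PORT A =====
-- Pyramidal_Order_RBS_gates(nbr_qubits, first_RBS) -> (List_order, List_layer_index)
def pvPyramidalOrder (nbr_qubits : Int) (first_RBS : Int) :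
    List Int × List (List Int) :=
  -- beginning of the pyramid
  let st1 : List (List Int) × List (List Int) × Int :=
    (PySem.List.pyRange 0 (PySem.Int.floordiv nbr_qubits 2) 1).foldl
      (fun st i =>
        let t1 : List Int × List Int × Int :=
          (PySem.List.pyRange 0 (i + 1) 1).foldl
            (fun t j =>
              if i * 2 < nbr_qubits - 1 then (t.1 ++ [j * 2], t.2.1 ++ [t.2.2], t.2.2 + 1) else t)
            ([], [], st.2.2)
        let st : List (List Int) × List (List Int) × Int :=
          if t1.1.length > 0 then (st.1 ++ [t1.1], st.2.1 ++ [t1.2.1], t1.2.2)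
          else (st.1, st.2.1, t1.2.2)
        let t2 : List Int × List Int × Int :=
          (PySem.List.pyRange 0 (i + 1) 1).foldl
            (fun t j =>
              if i * 2 + 1 < nbr_qubits - 1 then (t.1 ++ [j * 2 + 1], t.2.1 ++ [t.2.2], t.2.2 + 1) else t)
            ([], [], st.2.2)
        if t2.1.length > 0 then (st.1 ++ [t2.1], st.2.1 ++ [t2.2.1], t2.2.2)
        else (st.1, st.2.1, t2.2.2))
      ([], [], first_RBS)
  -- end of the pyramid; List_layers[i] is read at a non-negative in-range index, so pyGetD is exact
  let st2 : List (List Int) × List (List Int) × Int :=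
    (PySem.List.pyRange ((st1.1.length : Int) - 2) (-1) (-1)).foldl
      (fun st i =>
        let row := PySem.List.pyGetD st.1 i []
        let t : List Int × Int :=
          (PySem.List.pyRange 0 ((row.length : Int)) 1).foldl
            (fun t _ => (t.1 ++ [t.2], t.2 + 1)) ([], st.2.2)
        (st.1 ++ [row], st.2.1 ++ [t.1], t.2))
      st1
  -- deconcatenate
  ((PySem.List.enumerate st2.1 0).foldl (fun acc p => acc ++ p.2) [], st2.2.1)

-- PQNN_building_brick(start_qubit, size, index_first_RBS, index_first_param)
def pvPQNNBrick (start_qubit : Int) (size : Int) (index_first_RBS : Int) (index_first_param : Int) :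
    PySem.Dict Int Int × PySem.Dict Int Int × List (List Int) :=
  let ol := pvPyramidalOrder size start_qubit
  let dicts : PySem.Dict Int Int × PySem.Dict Int Int :=
    (PySem.List.enumerate ol.1 0).foldl
      (fun d p => (d.1.insert (index_first_RBS + p.1) (index_first_param + p.1),
                   d.2.insert (index_first_RBS + p.1) (start_qubit + p.2)))
      (PySem.Dict.empty, PySem.Dict.empty)
  let pl : List (List Int) × Int :=
    ol.2.foldl (fun pl layer =>
      let t : List Int × Int := layer.foldl (fun t _ => (t.1 ++ [t.2], t.2 + 1)) ([], pl.2)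
      (pl.1 ++ [t.1], t.2)) ([], index_first_RBS)
  (dicts.1, dicts.2, pl.1)

def QCNN_RBS_based_VQC (I : Int) (K : Int) :
    List (List Int) × (List (Int × Int)) × (List (Int × Int)) :=
  let nbr_parameters := K * (K - 1)
  let QNN0 : List (List Int) := (PySem.List.pyRange 0 (2 * K - 3) 1).map (fun _ => [])
  let fin : List (List Int) × PySem.Dict Int Int × PySem.Dict Int Int :=
    (PySem.List.pyRange 0 (PySem.Int.floordiv (I - K) K + 1) 1).foldl
      (fun st index_filter =>
        let b1 := pvPQNNBrick (K * index_filter) K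
                    (index_filter * (PySem.Int.floordiv nbr_parameters 2)) 0
        let b2 := pvPQNNBrick (I + K * index_filter) K
                    ((PySem.Int.floordiv I K + index_filter) * (PySem.Int.floordiv nbr_parameters 2))
                    (PySem.Int.floordiv nbr_parameters 2)
        let rbs := (st.2.2.update b1.2.1.items).update b2.2.1.items
        let par := (st.2.1.update b1.1.items).update b2.1.items
        -- QNN_layer[inner] is written at a non-negative in-range index; pySetD/pyGetD are exact
        let qnn :=
          (PySem.List.pyRange 0 (2 * K - 3) 1).foldl
            (fun Q inner =>
              (PySem.List.pyRange 0 (((PySem.List.pyGetD b1.2.2 inner []).length : Int)) 1).foldl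
                (fun Q e =>
                  let Q := PySem.List.pySetD Q inner
                    (PySem.List.pyGetD Q inner [] ++
                      [PySem.List.pyGetD (PySem.List.pyGetD b1.2.2 inner []) e 0])
                  PySem.List.pySetD Q inner
                    (PySem.List.pyGetD Q inner [] ++
                      [PySem.List.pyGetD (PySem.List.pyGetD b2.2.2 inner []) e 0]))
                Q)
            st.1
        (qnn, par, rbs))
      (QNN0, PySem.Dict.empty, PySem.Dict.empty)
  (fin.1, fin.2.1.items, fin.2.2.items)

-- ===== PORT B =====
-- layers = [(start, length, parity)] per inner layer, from m = min(li, 2K-4-li)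
def pvAltLayers (K : Int) : List (Int × Int × Int) :=
  ((PySem.List.pyRange 0 (2 * K - 3) 1).foldl
    (fun (t : List (Int × Int × Int) × Int) li =>
      let m := min li (2 * K - 4 - li)
      (t.1 ++ [(t.2, PySem.Int.floordiv m 2 + 1, PySem.Int.mod m 2)],
       t.2 + (PySem.Int.floordiv m 2 + 1)))
    ([], 0)).1

def QCNN_RBS_based_VQC_alt (I : Int) (K : Int) :
    List (List Int) × (List (Int × Int)) × (List (Int × Int)) :=
  let F := PySem.Int.floordiv (I - K) K + 1
  let G := PySem.Int.floordiv (K * (K - 1)) 2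
  let half := PySem.Int.floordiv I K
  let layers := pvAltLayers K
  let QNN_layer : List (List Int) :=
    layers.map (fun slp =>
      (PySem.List.pyRange 0 F 1).flatMap (fun f =>
        (PySem.List.pyRange 0 slp.2.1 1).flatMap (fun e =>
          [f * G + slp.1 + e, (half + f) * G + slp.1 + e])))
  let dicts : PySem.Dict Int Int × PySem.Dict Int Int :=
    if 0 < F then
      let qub : List Int :=
        layers.flatMap (fun slp =>
          (PySem.List.pyRange 0 slp.2.1 1).map (fun e => 2 * e + slp.2.2))
      (PySem.List.pyRange 0 F 1).foldl
        (fun d f =>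
          let d1 := (PySem.List.enumerate qub 0).foldl
            (fun d p => (d.1.insert (f * G + p.1) p.1,
                         d.2.insert (f * G + p.1) (K * f + p.2))) d
          (PySem.List.enumerate qub 0).foldl
            (fun d p => (d.1.insert ((half + f) * G + p.1) (G + p.1),
                         d.2.insert ((half + f) * G + p.1) (I + K * f + p.2))) d1)
        (PySem.Dict.empty, PySem.Dict.empty)
    else (PySem.Dict.empty, PySem.Dict.empty)
  (QNN_layer, dicts.1.items, dicts.2.items)

-- ===== PRECONDITION & SPEC =====
-- Pre_ excludes only K = 0, where the Python A raises ZeroDivisionError (I // K).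
def Pre_QCNN_RBS_based_VQC (I : Int) (K : Int) : Prop := K ≠ 0
instance (I : Int) (K : Int) : Decidable (Pre_QCNN_RBS_based_VQC I K) := by
  unfold Pre_QCNN_RBS_based_VQC; infer_instance

def pvWitness_QCNN_RBS_based_VQC : Int × Int := (6, 3)

def Spec_QCNN_RBS_based_VQC (I : Int) (K : Int)
    (out : List (List Int) × (List (Int × Int)) × (List (Int × Int))) : Prop :=
  out = QCNN_RBS_based_VQC_alt I K
instance (I : Int) (K : Int) (out : List (List Int) × (List (Int × Int)) × (List (Int × Int))) :
    Decidable (Spec_QCNN_RBS_based_VQC I K out) := by unfold Spec_QCNN_RBS_based_VQC; infer_instance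

-- ===== CLAIM (what is proved, stated in full; the proofs are below) =====
def Claim_equal_QCNN_RBS_based_VQC : Prop := ∀ (I : Int) (K : Int),
  Dom_QCNN_RBS_based_VQC I K → Pre_QCNN_RBS_based_VQC I K →
  Spec_QCNN_RBS_based_VQC I K (QCNN_RBS_based_VQC I K)

-- ===== LEMMAS AND PROOFS =====

-- === generic fold helpers ===
theorem pvFoldlCongrInv {α β : Type} (L : List β) (f g : α → β → α)
    (init : α) (hstep : ∀ a b, b ∈ L → f a b = g a b) :
    L.foldl f init = L.foldl g init := by
  induction L generalizing init with
  | nil => rfl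
  | cons x xs ih =>
    simp only [List.foldl_cons, hstep init x (by simp)]
    exact ih (g init x) (fun a b hb => hstep a b (by simp [hb]))

theorem pvFoldId {α β : Type} (L : List β) (init : α) :
    L.foldl (fun t _ => t) init = init := by
  induction L generalizing init with
  | nil => rfl
  | cons x xs ih => simp only [List.foldl_cons] at *; exact ih init

theorem pvFoldTriple (L : List Int) (f : Int → Int) (l0 li0 : List Int) (n0 : Int) :
    L.foldl (fun t j => (t.1 ++ [f j], t.2.1 ++ [t.2.2], t.2.2 + 1)) (l0, li0, n0)
    = (l0 ++ L.map f, li0 ++ PySem.List.pyRange n0 (n0 + L.length) 1, n0 + L.length) := by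
  induction L generalizing l0 li0 n0 with
  | nil => simp [PySem.List.pyRange_one_eq_nil]
  | cons x xs ih =>
    have h1 : n0 < n0 + ((xs.length : Int) + 1) := by omega
    simp only [List.foldl_cons, ih, List.map_cons, List.length_cons]
    rw [show ((xs.length + 1 : Nat) : Int) = (xs.length : Int) + 1 by push_cast; ring,
        PySem.List.pyRange_one_cons h1]
    simp [List.append_assoc]
    constructor
    · rw [show n0 + ((xs.length : Int) + 1) = n0 + 1 + (xs.length : Int) by ring]
    · ring

theorem pvFoldPair {α : Type} (L : List α) (l0 : List Int) (n0 : Int) :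
    L.foldl (fun (t : List Int × Int) _ => (t.1 ++ [t.2], t.2 + 1)) (l0, n0)
    = (l0 ++ PySem.List.pyRange n0 (n0 + L.length) 1, n0 + L.length) := by
  induction L generalizing l0 n0 with
  | nil => simp [PySem.List.pyRange_one_eq_nil]
  | cons x xs ih =>
    have h1 : n0 < n0 + ((xs.length : Int) + 1) := by omega
    simp only [List.foldl_cons, ih, List.length_cons]
    rw [show ((xs.length + 1 : Nat) : Int) = (xs.length : Int) + 1 by push_cast; ring,
        PySem.List.pyRange_one_cons h1]
    simp [List.append_assoc]
    constructor
    · rw [show n0 + ((xs.length : Int) + 1) = n0 + 1 + (xs.length : Int) by ring]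
    · ring

theorem pvFoldPairSplit {α β γ : Type} (L : List γ) (f : α → γ → α) (g : β → γ → β)
    (a : α) (b : β) :
    L.foldl (fun d p => (f d.1 p, g d.2 p)) (a, b) = (L.foldl f a, L.foldl g b) := by
  induction L generalizing a b with
  | nil => rfl
  | cons x xs ih => simp [List.foldl_cons, ih]

-- === A-side normal form building blocks ===
def pvConsec (n : Int) : List Nat → List (List Int)
  | [] => []
  | L :: Ls => PySem.List.pyRange n (n + (L : Int)) 1 :: pvConsec (n + (L : Int)) Ls

def pvLens (rows : List (List Int)) : List Nat := rows.map List.length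

def pvIns (d : PySem.Dict Int Int) (ps : List (Int × Int)) : PySem.Dict Int Int :=
  ps.foldl (fun d p => d.insert p.1 p.2) d

def pvAppendAt (Q : List (List Int)) (i : Int) (blk : List Int) : List (List Int) :=
  PySem.List.pySetD Q i (PySem.List.pyGetD Q i [] ++ blk)

def pvAppendBlocks (Q : List (List Int)) (s : Int) : List (List Int) → List (List Int)
  | [] => Q
  | b :: bs => pvAppendBlocks (pvAppendAt Q s b) (s + 1) bs

def pvBlocks (b1 b2 r0 : Int) : List Nat → List (List Int)
  | [] => []
  | L :: Ls => (PySem.List.pyRange r0 (r0 + (L : Int)) 1).flatMap (fun r => [b1 + r, b2 + r]) ::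
               pvBlocks b1 b2 (r0 + (L : Int)) Ls

theorem pvLens_pvConsec (ls : List Nat) (n : Int) : pvLens (pvConsec n ls) = ls := by
  induction ls generalizing n with
  | nil => rfl
  | cons L Ls ih =>
    simp only [pvConsec, pvLens, List.map_cons] at ih ⊢
    rw [show (PySem.List.pyRange n (n + (L:Int)) 1).length = L by
          simp [PySem.List.length_pyRange_one]]
    exact congrArg (L :: ·) (ih _)

theorem pvConsec_snoc (ls : List Nat) (L : Nat) (n : Int) :
    pvConsec n (ls ++ [L]) =
      pvConsec n ls ++ [PySem.List.pyRange (n + (ls.sum : Int)) (n + (ls.sum : Int) + (L : Int)) 1] := by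
  induction ls generalizing n with
  | nil => simp [pvConsec]
  | cons M Ms ih =>
    simp only [List.cons_append, pvConsec, ih, List.sum_cons]
    rw [show n + ((M + Ms.sum : Nat) : Int) = n + (M : Int) + (Ms.sum : Int) by push_cast; ring]

theorem pvBlocks_snoc (b1 b2 r0 : Int) (ls : List Nat) (L : Nat) :
    pvBlocks b1 b2 r0 (ls ++ [L]) =
      pvBlocks b1 b2 r0 ls ++
        [(PySem.List.pyRange (r0 + (ls.sum : Int)) (r0 + (ls.sum : Int) + (L : Int)) 1).flatMap
          (fun r => [b1 + r, b2 + r])] := by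
  induction ls generalizing r0 with
  | nil => simp [pvBlocks]
  | cons M Ms ih =>
    simp only [List.cons_append, pvBlocks, ih, List.sum_cons]
    rw [show r0 + ((M + Ms.sum : Nat) : Int) = r0 + (M : Int) + (Ms.sum : Int) by push_cast; ring]

theorem pvEnumFlat (L : List (List Int)) (s : Int) (acc : List Int) :
    (PySem.List.enumerate L s).foldl (fun a p => a ++ p.2) acc = acc ++ L.flatten := by
  induction L generalizing s acc with
  | nil => simp [PySem.List.enumerate]
  | cons x xs ih =>
    rw [show PySem.List.enumerate (x :: xs) s = (s, x) :: PySem.List.enumerate xs (s + 1) from rfl]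
    simp only [List.foldl_cons, ih, List.flatten_cons, List.append_assoc]

theorem pvInnerA (c : Prop) [Decidable c] (g : Int → Int) (m n0 : Int) :
    (PySem.List.pyRange 0 m 1).foldl
      (fun (t : List Int × List Int × Int) j =>
        if c then (t.1 ++ [g j], t.2.1 ++ [t.2.2], t.2.2 + 1) else t)
      ([], [], n0)
    = if c then ((PySem.List.pyRange 0 m 1).map g,
                 PySem.List.pyRange n0 (n0 + ((PySem.List.pyRange 0 m 1).length : Int)) 1,
                 n0 + ((PySem.List.pyRange 0 m 1).length : Int))
      else ([], [], n0) := by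
  by_cases hc : c
  · simp only [hc, if_true]
    simpa using pvFoldTriple (PySem.List.pyRange 0 m 1) g [] [] n0
  · simp only [hc, if_false]
    exact pvFoldId _ _

def pvBodyA (K : Int) (st : List (List Int) × List (List Int) × Int) (i : Int) :
    List (List Int) × List (List Int) × Int :=
  let t1 : List Int × List Int × Int :=
    (PySem.List.pyRange 0 (i + 1) 1).foldl
      (fun t j =>
        if i * 2 < K - 1 then (t.1 ++ [j * 2], t.2.1 ++ [t.2.2], t.2.2 + 1) else t)
      ([], [], st.2.2)
  let st : List (List Int) × List (List Int) × Int :=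
    if t1.1.length > 0 then (st.1 ++ [t1.1], st.2.1 ++ [t1.2.1], t1.2.2)
    else (st.1, st.2.1, t1.2.2)
  let t2 : List Int × List Int × Int :=
    (PySem.List.pyRange 0 (i + 1) 1).foldl
      (fun t j =>
        if i * 2 + 1 < K - 1 then (t.1 ++ [j * 2 + 1], t.2.1 ++ [t.2.2], t.2.2 + 1) else t)
      ([], [], st.2.2)
  if t2.1.length > 0 then (st.1 ++ [t2.1], st.2.1 ++ [t2.2.1], t2.2.2)
  else (st.1, st.2.1, t2.2.2)

def pvBodyB (K : Int) (acc : List (List Int)) (i : Int) : List (List Int) :=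
  let acc := if 2 * i < K - 1 then
      acc ++ [(PySem.List.pyRange 0 (i + 1) 1).map (fun j => 2 * j)] else acc
  if 2 * i + 1 < K - 1 then
      acc ++ [(PySem.List.pyRange 0 (i + 1) 1).map (fun j => 2 * j + 1)] else acc

theorem pvStep1Single (K : Int) (i : Int) (hi : 0 ≤ i) (acc : List (List Int)) (s : Int) :
    pvBodyA K (acc, pvConsec s (pvLens acc), s + ((pvLens acc).sum : Int)) i
    = (pvBodyB K acc i, pvConsec s (pvLens (pvBodyB K acc i)),
       s + ((pvLens (pvBodyB K acc i)).sum : Int)) := by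
  have e1 : (i * 2 < K - 1) = (2 * i < K - 1) := by rw [Int.mul_comm]
  have e2 : (i * 2 + 1 < K - 1) = (2 * i + 1 < K - 1) := by rw [Int.mul_comm]
  have hlen : ((PySem.List.pyRange 0 (i + 1) 1).length : Int) = i + 1 := by
    simp [PySem.List.length_pyRange_one]; omega
  have hlenpos : 0 < (PySem.List.pyRange 0 (i + 1) 1).length := by omega
  have hm0 : List.map (fun j : Int => j * 2) (PySem.List.pyRange 0 (i + 1) 1)
      = List.map (fun j : Int => 2 * j) (PySem.List.pyRange 0 (i + 1) 1) :=
    List.map_congr_left (fun x _ => by ring)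
  have hm1 : List.map (fun j : Int => j * 2 + 1) (PySem.List.pyRange 0 (i + 1) 1)
      = List.map (fun j : Int => 2 * j + 1) (PySem.List.pyRange 0 (i + 1) 1) :=
    List.map_congr_left (fun x _ => by ring)
  simp only [pvBodyA, pvBodyB, e1, e2, pvInnerA]
  by_cases c1 : 2 * i < K - 1 <;> by_cases c2 : 2 * i + 1 < K - 1 <;>
    simp only [c1, c2, if_true, if_false, List.length_map, gt_iff_lt, hlenpos,
      List.length_nil, lt_irrefl, pvLens, List.map_append, List.map_cons, List.map_nil,
      List.sum_append, List.sum_cons, List.sum_nil, List.length_map]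
  · rw [hm0, hm1, pvConsec_snoc, pvConsec_snoc]
    simp only [List.sum_append, List.sum_cons, List.sum_nil, Prod.mk.injEq, List.append_assoc]
    refine ⟨trivial, ?_, by push_cast; ring⟩
    have hr : ∀ a a' b b' : Int, a = a' → b = b' →
        ([PySem.List.pyRange a b 1] : List (List Int)) = [PySem.List.pyRange a' b' 1] := by
      intro a a' b b' h1 h2; rw [h1, h2]
    congr 2
    exact hr _ _ _ _ (by push_cast; ring) (by push_cast; ring)
  · rw [hm0, pvConsec_snoc]
    simp only [Prod.mk.injEq]
    refine ⟨trivial, trivial, by push_cast; ring⟩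
  · rw [hm1, pvConsec_snoc]
    simp only [Prod.mk.injEq]
    refine ⟨trivial, trivial, by push_cast; ring⟩

theorem pvStep1Fold (K : Int) (L : List Int) (hL : ∀ i ∈ L, 0 ≤ i) (acc : List (List Int)) (s : Int) :
    L.foldl (pvBodyA K) (acc, pvConsec s (pvLens acc), s + ((pvLens acc).sum : Int))
    = (L.foldl (pvBodyB K) acc,
       pvConsec s (pvLens (L.foldl (pvBodyB K) acc)),
       s + ((pvLens (L.foldl (pvBodyB K) acc)).sum : Int)) := by
  induction L generalizing acc with
  | nil => rfl
  | cons i L ih =>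
    simp only [List.foldl_cons, pvStep1Single K i (hL i (by simp)) acc s]
    exact ih (fun x hx => hL x (by simp [hx])) _

def pvBody2 (st : List (List Int) × List (List Int) × Int) (i : Int) :
    List (List Int) × List (List Int) × Int :=
  let row := PySem.List.pyGetD st.1 i []
  let t : List Int × Int :=
    (PySem.List.pyRange 0 ((row.length : Int)) 1).foldl
      (fun t _ => (t.1 ++ [t.2], t.2 + 1)) ([], st.2.2)
  (st.1 ++ [row], st.2.1 ++ [t.1], t.2)

theorem pvStep2Fold (asc : List (List Int)) (j : Nat) (hj : j ≤ asc.length)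
    (ex : List (List Int)) (s : Int) :
    (PySem.List.pyRange ((j : Int) - 1) (-1) (-1)).foldl pvBody2
      (asc ++ ex, pvConsec s (pvLens (asc ++ ex)), s + ((pvLens (asc ++ ex)).sum : Int))
    = (asc ++ ex ++ (asc.take j).reverse,
       pvConsec s (pvLens (asc ++ ex ++ (asc.take j).reverse)),
       s + ((pvLens (asc ++ ex ++ (asc.take j).reverse)).sum : Int)) := by
  induction j generalizing ex with
  | zero =>
    rw [PySem.List.pyRange_neg_one_eq_nil (by omega)]
    simp
  | succ j ih =>
    have hj' : j < asc.length := hj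
    have hcast : ((j + 1 : Nat) : Int) - 1 = (j : Int) := by push_cast; ring
    rw [hcast, PySem.List.pyRange_neg_one_cons (by omega)]
    simp only [List.foldl_cons]
    have hrow : PySem.List.pyGetD (asc ++ ex) ((j : Nat) : Int) [] = asc[j] := by
      simp only [PySem.List.pyGetD_natCast]
      rw [List.getD_append _ _ _ _ hj', List.getD_eq_getElem _ _ hj']
    have hstep : pvBody2 (asc ++ ex, pvConsec s (pvLens (asc ++ ex)),
          s + ((pvLens (asc ++ ex)).sum : Int)) (j : Int)
        = (asc ++ (ex ++ [asc[j]]), pvConsec s (pvLens (asc ++ (ex ++ [asc[j]]))),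
           s + ((pvLens (asc ++ (ex ++ [asc[j]]))).sum : Int)) := by
      simp only [pvBody2, hrow]
      rw [show (PySem.List.pyRange 0 ((asc[j].length : Int)) 1).foldl
            (fun t _ => (t.1 ++ [t.2], t.2 + 1)) (([] : List Int), s + ((pvLens (asc ++ ex)).sum : Int))
          = ([] ++ PySem.List.pyRange (s + ((pvLens (asc ++ ex)).sum : Int))
              (s + ((pvLens (asc ++ ex)).sum : Int) +
                ((PySem.List.pyRange 0 ((asc[j].length : Int)) 1).length : Int)) 1,
             s + ((pvLens (asc ++ ex)).sum : Int) +
               ((PySem.List.pyRange 0 ((asc[j].length : Int)) 1).length : Int))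
          from pvFoldPair _ [] _]
      have hlen : ((PySem.List.pyRange 0 ((asc[j].length : Int)) 1).length : Int)
          = (asc[j].length : Int) := by
        simp [PySem.List.length_pyRange_one]
      rw [hlen]
      have hsnoc := pvConsec_snoc (pvLens (asc ++ ex)) (asc[j].length) s
      simp only [pvLens, List.map_append, List.map_cons, List.map_nil] at hsnoc ⊢
      rw [show List.map List.length asc ++ (List.map List.length ex ++ [asc[j].length])
            = (List.map List.length asc ++ List.map List.length ex) ++ [asc[j].length]
          from (List.append_assoc _ _ _).symm, hsnoc]
      simp only [List.nil_append, Prod.mk.injEq, List.append_assoc, List.sum_append,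
        List.sum_cons, List.sum_nil]
      refine ⟨trivial, trivial, by push_cast; ring⟩
    rw [hstep, ih (by omega) (ex ++ [asc[j]])]
    have htake : asc.take (j + 1) = asc.take j ++ [asc[j]] := by
      rw [List.take_succ, List.getElem?_eq_getElem hj']
      rfl
    have hrev : (List.take (j + 1) asc).reverse = asc[j] :: (List.take j asc).reverse := by
      rw [htake]; simp
    rw [hrev]
    simp [List.append_assoc]

-- ascending half of the pyramid, as A builds it
def pvAltAsc (K : Int) : List (List Int) :=
  (PySem.List.pyRange 0 (PySem.Int.floordiv K 2) 1).foldl (pvBodyB K) []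

def pvAltRows (K : Int) : List (List Int) :=
  pvAltAsc K ++ (pvAltAsc K).dropLast.reverse

theorem pvBodyB_len (K : Int) (acc : List (List Int)) (i : Int) :
    ((pvBodyB K acc i).length : Int) = (acc.length : Int)
      + (if 2 * i < K - 1 then 1 else 0) + (if 2 * i + 1 < K - 1 then 1 else 0) := by
  simp only [pvBodyB]
  split_ifs <;> simp <;> push_cast <;> ring

theorem pvAltAscLenAux (K : Int) (hK : 1 ≤ K) (M : Nat) :
    ((((PySem.List.pyRange 0 (M : Int) 1).foldl (pvBodyB K) []).length : Int))
      = min (2 * (M : Int)) (K - 1) := by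
  induction M with
  | zero => simp [PySem.List.pyRange_zero_nat]; omega
  | succ M ih =>
    have : ((M + 1 : Nat) : Int) = (M : Int) + 1 := by push_cast; ring
    rw [this, PySem.List.pyRange_one_succ_right (by omega), List.foldl_append]
    simp only [List.foldl_cons, List.foldl_nil]
    rw [pvBodyB_len, ih]
    split_ifs <;> omega

theorem pvAltAsc_nil (K : Int) (hK : K ≤ 1) : pvAltAsc K = [] := by
  rw [pvAltAsc]
  have h2 : PySem.Int.floordiv K 2 = K / 2 := PySem.Int.floordiv_eq_ediv_of_pos (by norm_num)
  rw [h2, PySem.List.pyRange_one_eq_nil (by omega)]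
  rfl

theorem pvAltAsc_len (K : Int) (hK : 1 ≤ K) : ((pvAltAsc K).length : Int) = K - 1 := by
  rw [pvAltAsc]
  have h2 : PySem.Int.floordiv K 2 = K / 2 := PySem.Int.floordiv_eq_ediv_of_pos (by norm_num)
  have h0 : 0 ≤ K / 2 := by omega
  have hM : ((K / 2).toNat : Int) = K / 2 := by omega
  rw [h2, show K / 2 = (((K / 2).toNat : Nat) : Int) from hM.symm, pvAltAscLenAux K hK]
  omega

theorem pvAltRows_len (K : Int) : ((pvAltRows K).length : Int) = max (2 * K - 3) 0 := by
  rw [pvAltRows]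
  by_cases h2 : 2 ≤ K
  · have ha := pvAltAsc_len K (by omega)
    simp only [List.length_append, List.length_reverse, List.length_dropLast]
    push_cast
    omega
  · rw [pvAltAsc_nil K (by omega)]
    simp; omega

theorem pvPyr (K s : Int) :
    pvPyramidalOrder K s = ((pvAltRows K).flatten, pvConsec s (pvLens (pvAltRows K))) := by
  simp only [pvPyramidalOrder]
  rw [show (fun (st : List (List Int) × List (List Int) × Int) (i : Int) =>
        let t1 : List Int × List Int × Int :=
          (PySem.List.pyRange 0 (i + 1) 1).foldl
            (fun t j =>
              if i * 2 < K - 1 then (t.1 ++ [j * 2], t.2.1 ++ [t.2.2], t.2.2 + 1) else t)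
            ([], [], st.2.2)
        let st : List (List Int) × List (List Int) × Int :=
          if t1.1.length > 0 then (st.1 ++ [t1.1], st.2.1 ++ [t1.2.1], t1.2.2)
          else (st.1, st.2.1, t1.2.2)
        let t2 : List Int × List Int × Int :=
          (PySem.List.pyRange 0 (i + 1) 1).foldl
            (fun t j =>
              if i * 2 + 1 < K - 1 then (t.1 ++ [j * 2 + 1], t.2.1 ++ [t.2.2], t.2.2 + 1) else t)
            ([], [], st.2.2)
        if t2.1.length > 0 then (st.1 ++ [t2.1], st.2.1 ++ [t2.2.1], t2.2.2)
        else (st.1, st.2.1, t2.2.2)) = pvBodyA K from rfl]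
  rw [show (fun (st : List (List Int) × List (List Int) × Int) (i : Int) =>
        let row := PySem.List.pyGetD st.1 i []
        let t : List Int × Int :=
          (PySem.List.pyRange 0 ((row.length : Int)) 1).foldl
            (fun t _ => (t.1 ++ [t.2], t.2 + 1)) ([], st.2.2)
        (st.1 ++ [row], st.2.1 ++ [t.1], t.2)) = pvBody2 from rfl]
  have h1 : (([], [], s) : List (List Int) × List (List Int) × Int)
      = ([], pvConsec s (pvLens []), s + ((pvLens []).sum : Int)) := by
    simp [pvLens, pvConsec]
  rw [h1, pvStep1Fold K _ (fun i hi => ((PySem.List.mem_pyRange_one).1 hi).1) [] s,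
      ← pvAltAsc]
  by_cases hnil : pvAltAsc K = []
  · rw [hnil]
    rw [show ((([] : List (List Int)).length : Int) - 2) = -2 by simp]
    rw [PySem.List.pyRange_neg_one_eq_nil (by omega)]
    simp only [List.foldl_nil]
    rw [pvAltRows, hnil]
    simp [pvEnumFlat, pvLens, pvConsec]
  · have hlen1 : 1 ≤ (pvAltAsc K).length := List.length_pos_of_ne_nil hnil
    have hc : (((pvAltAsc K).length : Int)) - 2 = (((pvAltAsc K).length - 1 : Nat) : Int) - 1 := by
      omega
    have h2 := pvStep2Fold (pvAltAsc K) ((pvAltAsc K).length - 1) (by omega) [] s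
    simp only [List.append_nil] at h2
    rw [hc, h2]
    have hrows : pvAltRows K = pvAltAsc K ++ ((pvAltAsc K).take ((pvAltAsc K).length - 1)).reverse := by
      rw [pvAltRows, List.dropLast_eq_take]
    rw [← hrows, pvEnumFlat]
    simp

theorem pvInsMap {α : Type} (L : List α) (h : α → Int × Int) (d : PySem.Dict Int Int) :
    pvIns d (L.map h) = L.foldl (fun d x => d.insert (h x).1 (h x).2) d := by
  simp [pvIns, List.foldl_map]

theorem pvPlFold (lidx : List (List Int)) (acc : List (List Int)) (n : Int) :
    lidx.foldl (fun (pl : List (List Int) × Int) layer =>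
      (pl.1 ++ [PySem.List.pyRange pl.2 (pl.2 + (layer.length : Int)) 1],
       pl.2 + (layer.length : Int))) (acc, n)
    = (acc ++ pvConsec n (pvLens lidx), n + ((pvLens lidx).sum : Int)) := by
  induction lidx generalizing acc n with
  | nil => simp [pvConsec, pvLens]
  | cons layer rest ih =>
    simp only [List.foldl_cons, ih]
    simp only [pvConsec, pvLens, List.map_cons, List.sum_cons, List.append_assoc,
      List.singleton_append, Prod.mk.injEq]
    exact ⟨trivial, by push_cast; ring⟩

theorem pvBrick (start size fR fP : Int) :
    pvPQNNBrick start size fR fP =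
      (pvIns PySem.Dict.empty ((PySem.List.enumerate (pvAltRows size).flatten 0).map
         (fun p => (fR + p.1, fP + p.1))),
       pvIns PySem.Dict.empty ((PySem.List.enumerate (pvAltRows size).flatten 0).map
         (fun p => (fR + p.1, start + p.2))),
       pvConsec fR (pvLens (pvAltRows size))) := by
  simp only [pvPQNNBrick, pvPyr size start, pvFoldPair, List.nil_append]
  rw [pvFoldPairSplit _
        (fun (d : PySem.Dict Int Int) (p : Int × Int) => d.insert (fR + p.1) (fP + p.1))
        (fun (d : PySem.Dict Int Int) (p : Int × Int) => d.insert (fR + p.1) (start + p.2))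
        PySem.Dict.empty PySem.Dict.empty,
      pvPlFold]
  simp only [List.nil_append, pvLens_pvConsec, pvInsMap]

theorem pvConsec_len (ls : List Nat) (n : Int) : (pvConsec n ls).length = ls.length := by
  have := congrArg List.length (pvLens_pvConsec ls n)
  simpa [pvLens] using this

theorem pvBlocks_len (b1 b2 r0 : Int) (ls : List Nat) :
    (pvBlocks b1 b2 r0 ls).length = ls.length := by
  induction ls generalizing r0 with
  | nil => rfl
  | cons L Ls ih => simp [pvBlocks, ih]

theorem pvAppendAt_toNat (Q : List (List Int)) (i : Int) (blk : List Int) (h : 0 ≤ i) :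
    pvAppendAt Q i blk = Q.set i.toNat (Q.getD i.toNat [] ++ blk) := by
  have hi : i = ((i.toNat : Nat) : Int) := by omega
  rw [pvAppendAt, hi]
  simp only [PySem.List.pySetD_natCast, PySem.List.pyGetD_natCast, Int.toNat_natCast]

theorem pvAppendAt_nil (Q : List (List Int)) (i : Int) (h : 0 ≤ i) :
    pvAppendAt Q i [] = Q := by
  rw [pvAppendAt_toNat _ _ _ h, List.append_nil]
  by_cases hn : i.toNat < Q.length
  · rw [List.getD_eq_getElem _ _ hn, List.set_getElem_self]
  · rw [List.set_eq_of_length_le (by omega)]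

theorem pvAppendAt_merge (Q : List (List Int)) (i : Int) (u v : List Int) (h : 0 ≤ i) :
    pvAppendAt (pvAppendAt Q i u) i v = pvAppendAt Q i (u ++ v) := by
  rw [pvAppendAt_toNat _ _ _ h, pvAppendAt_toNat _ _ _ h, pvAppendAt_toNat _ _ _ h]
  by_cases hn : i.toNat < Q.length
  · have hset : (Q.set i.toNat (Q.getD i.toNat [] ++ u)).getD i.toNat []
        = Q.getD i.toNat [] ++ u := by
      rw [List.getD_eq_getElem _ _ (by simpa using hn)]
      simp
    rw [hset, List.set_set, List.append_assoc]
  · have hQ : ∀ w : List Int, Q.set i.toNat w = Q :=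
      fun w => List.set_eq_of_length_le (by omega)
    rw [hQ, hQ]
    exact (hQ _).symm

theorem pvGetD_append_left (xs ys : List (List Int)) (i : Int) (h0 : 0 ≤ i)
    (h : i < (xs.length : Int)) :
    PySem.List.pyGetD (xs ++ ys) i [] = PySem.List.pyGetD xs i [] := by
  have hi : i = ((i.toNat : Nat) : Int) := by omega
  rw [hi]
  simp only [PySem.List.pyGetD_natCast]
  rw [List.getD_append _ _ _ _ (by omega)]

theorem pvGetD_concat (xs : List (List Int)) (x : List Int) (i : Int)
    (hi : i = ((xs.length : Nat) : Int)) :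
    PySem.List.pyGetD (xs ++ [x]) i [] = x := by
  subst hi
  simp only [PySem.List.pyGetD_natCast, Int.toNat_natCast]
  rw [List.getD_eq_getElem _ _ (by simp)]
  simp

theorem pvGetD_range (A : Int) (L : Nat) (e : Int) (h0 : 0 ≤ e) (hL : e < (L : Int)) :
    PySem.List.pyGetD (PySem.List.pyRange A (A + (L : Int)) 1) e 0 = A + e := by
  have hlen : (PySem.List.pyRange A (A + (L : Int)) 1).length = L := by
    simp [PySem.List.length_pyRange_one]
  have hb : e < (((PySem.List.pyRange A (A + (L : Int)) 1).length : Nat) : Int) := by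
    rw [hlen]; exact hL
  have hg := PySem.List.pyGetD_eq_getElem (xs := PySem.List.pyRange A (A + (L : Int)) 1) (i := e) (d := 0) h0 hb
  rw [hg, PySem.List.getElem_pyRange_one]
  omega

theorem pvAppendFoldRange (i : Int) (hi : 0 ≤ i) (hfun : Int → List Int) (L : Nat) :
    ∀ (r0 : Int) (Q : List (List Int)),
    (PySem.List.pyRange r0 (r0 + (L : Int)) 1).foldl (fun Q r => pvAppendAt Q i (hfun r)) Q
      = pvAppendAt Q i ((PySem.List.pyRange r0 (r0 + (L : Int)) 1).flatMap hfun) := by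
  induction L with
  | zero =>
    intro r0 Q
    rw [PySem.List.pyRange_one_eq_nil (by omega)]
    simp [pvAppendAt_nil _ _ hi]
  | succ L ih =>
    intro r0 Q
    have hco : r0 < r0 + ((L + 1 : Nat) : Int) := by push_cast; omega
    rw [PySem.List.pyRange_one_cons hco]
    simp only [List.foldl_cons, List.flatMap_cons]
    have : r0 + ((L + 1 : Nat) : Int) = (r0 + 1) + (L : Int) := by push_cast; ring
    rw [this, ih (r0 + 1), pvAppendAt_merge _ _ _ _ hi]

theorem pvShiftBlock (b1 b2 off : Int) (L : Nat) :
    (PySem.List.pyRange 0 ((L : Nat) : Int) 1).flatMap (fun e => [b1 + off + e, b2 + off + e])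
    = (PySem.List.pyRange off (off + ((L : Nat) : Int)) 1).flatMap (fun r => [b1 + r, b2 + r]) := by
  induction L with
  | zero =>
    rw [PySem.List.pyRange_one_eq_nil (by omega), PySem.List.pyRange_one_eq_nil (by omega)]
    rfl
  | succ L ih =>
    have c1 : ((L + 1 : Nat) : Int) = (L : Int) + 1 := by push_cast; ring
    rw [c1, PySem.List.pyRange_one_succ_right (by omega),
        show off + ((L : Int) + 1) = (off + (L : Int)) + 1 by ring,
        PySem.List.pyRange_one_succ_right (by omega)]
    simp only [List.flatMap_append, ih, List.flatMap_cons, List.flatMap_nil]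
    rw [show b1 + off + (L : Int) = b1 + (off + (L : Int)) by ring,
        show b2 + off + (L : Int) = b2 + (off + (L : Int)) by ring]

theorem pvAInner (i : Int) (hi : 0 ≤ i) (A B : Int) (L : Nat) (r1 r2 : List Int)
    (h1 : r1 = PySem.List.pyRange A (A + (L : Int)) 1)
    (h2 : r2 = PySem.List.pyRange B (B + (L : Int)) 1) (Q : List (List Int)) :
    (PySem.List.pyRange 0 ((r1.length : Int)) 1).foldl
      (fun Q e =>
        let Q' := PySem.List.pySetD Q i
          (PySem.List.pyGetD Q i [] ++ [PySem.List.pyGetD r1 e 0])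
        PySem.List.pySetD Q' i
          (PySem.List.pyGetD Q' i [] ++ [PySem.List.pyGetD r2 e 0]))
      Q
    = pvAppendAt Q i ((PySem.List.pyRange 0 ((L : Nat) : Int) 1).flatMap
        (fun e => [A + e, B + e])) := by
  subst h1 h2
  have hlen : ((PySem.List.pyRange A (A + (L : Int)) 1).length : Int) = (L : Int) := by
    simp [PySem.List.length_pyRange_one]
  rw [hlen]
  rw [pvFoldlCongrInv _ _
      (fun Q e => pvAppendAt Q i [A + e, B + e]) Q
      (fun Q' e he => by
        obtain ⟨he0, heL⟩ := PySem.List.mem_pyRange_one.1 he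
        simp only []
        rw [pvGetD_range A L e he0 (by omega), pvGetD_range B L e he0 (by omega)]
        rw [show PySem.List.pySetD Q' i (PySem.List.pyGetD Q' i [] ++ [A + e])
              = pvAppendAt Q' i [A + e] from rfl]
        rw [show PySem.List.pySetD (pvAppendAt Q' i [A + e]) i
              (PySem.List.pyGetD (pvAppendAt Q' i [A + e]) i [] ++ [B + e])
              = pvAppendAt (pvAppendAt Q' i [A + e]) i [B + e] from rfl]
        rw [pvAppendAt_merge _ _ _ _ hi]
        simp)]
  have h0 : (PySem.List.pyRange 0 ((L : Nat) : Int) 1)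
      = PySem.List.pyRange 0 (0 + ((L : Nat) : Int)) 1 := by rw [zero_add]
  rw [h0, pvAppendFoldRange i hi (fun e => [A + e, B + e]) L 0 Q]

theorem pvAOuter (b1 b2 : Int) (lens : List Nat) :
    ∀ (Q : List (List Int)),
    (PySem.List.pyRange 0 ((lens.length : Int)) 1).foldl
      (fun Q inner =>
        (PySem.List.pyRange 0 (((PySem.List.pyGetD (pvConsec b1 lens) inner []).length : Int)) 1).foldl
          (fun Q e =>
            let Q' := PySem.List.pySetD Q inner
              (PySem.List.pyGetD Q inner [] ++
                [PySem.List.pyGetD (PySem.List.pyGetD (pvConsec b1 lens) inner []) e 0])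
            PySem.List.pySetD Q' inner
              (PySem.List.pyGetD Q' inner [] ++
                [PySem.List.pyGetD (PySem.List.pyGetD (pvConsec b2 lens) inner []) e 0]))
          Q)
      Q
    = pvAppendBlocks Q 0 (pvBlocks b1 b2 0 lens) := by
  induction lens using List.reverseRecOn with
  | nil =>
    intro Q
    simp [pvBlocks, pvAppendBlocks, PySem.List.pyRange_one_eq_nil]
  | append_singleton ls L ih =>
    intro Q
    have hcast : (((ls ++ [L]).length : Nat) : Int) = (ls.length : Int) + 1 := by
      simp
    rw [hcast, PySem.List.pyRange_one_succ_right (by omega), List.foldl_append]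
    simp only [List.foldl_cons, List.foldl_nil]
    have hcl : (pvConsec b1 ls).length = ls.length := pvConsec_len ls b1
    have hcl2 : (pvConsec b2 ls).length = ls.length := pvConsec_len ls b2
    rw [pvFoldlCongrInv _ _
        (fun Q inner =>
          (PySem.List.pyRange 0 (((PySem.List.pyGetD (pvConsec b1 ls) inner []).length : Int)) 1).foldl
            (fun Q e =>
              let Q' := PySem.List.pySetD Q inner
                (PySem.List.pyGetD Q inner [] ++
                  [PySem.List.pyGetD (PySem.List.pyGetD (pvConsec b1 ls) inner []) e 0])
              PySem.List.pySetD Q' inner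
                (PySem.List.pyGetD Q' inner [] ++
                  [PySem.List.pyGetD (PySem.List.pyGetD (pvConsec b2 ls) inner []) e 0]))
            Q)
        Q
        (fun Q' inner hin => by
          obtain ⟨hin0, hinL⟩ := PySem.List.mem_pyRange_one.1 hin
          rw [pvConsec_snoc, pvConsec_snoc,
              pvGetD_append_left _ _ _ hin0 (by rw [hcl]; omega),
              pvGetD_append_left _ _ _ hin0 (by rw [hcl2]; omega)])]
    rw [ih Q]
    rw [pvConsec_snoc, pvConsec_snoc]
    rw [pvGetD_concat _ _ _ (by rw [hcl]), pvGetD_concat _ _ _ (by rw [hcl2])]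
    rw [pvAInner ((ls.length : Nat) : Int) (by omega) (b1 + (ls.sum : Int)) (b2 + (ls.sum : Int))
        L _ _ rfl rfl]
    rw [pvShiftBlock b1 b2 ((ls.sum : Int)) L]
    rw [pvBlocks_snoc]
    rw [show ∀ (bs : List (List Int)) (b : List Int) (Q : List (List Int)) (s : Int),
          pvAppendBlocks Q s (bs ++ [b]) = pvAppendAt (pvAppendBlocks Q s bs) (s + bs.length) b
        from ?_]
    · rw [pvBlocks_len]
      rw [show (0 : Int) + (ls.length : Int) = (ls.length : Int) by ring,
          show (0 : Int) + (ls.sum : Int) = (ls.sum : Int) by ring]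
    · intro bs
      induction bs with
      | nil => intro b Q s; simp [pvAppendBlocks]
      | cons x xs ih2 =>
        intro b Q s
        simp only [List.cons_append, pvAppendBlocks, ih2, List.length_cons]
        congr 1
        push_cast; ring

theorem pvItemsIns (ps : List (Int × Int)) (hnd : (ps.map Prod.fst).Nodup) :
    (pvIns PySem.Dict.empty ps).items = ps := by
  have h := PySem.Dict.items_foldl_insert_fresh (l := ps) (k := Prod.fst) (v := Prod.snd)
    (d := (PySem.Dict.empty : PySem.Dict Int Int)) (by simp) hnd
  simpa [pvIns] using h

theorem pvPairsNodup (flat : List Int) (c : Int) (g : Int × Int → Int) :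
    (((PySem.List.enumerate flat 0).map (fun p => (c + p.1, g p))).map Prod.fst).Nodup := by
  rw [List.map_map]
  have he : ((PySem.List.enumerate flat 0).map (Prod.fst ∘ fun p => (c + p.1, g p)))
      = ((PySem.List.enumerate flat 0).map (fun p => p.1)).map (fun x => c + x) := by
    rw [List.map_map]
    rfl
  rw [he, PySem.List.map_fst_enumerate]
  exact (PySem.List.nodup_pyRange_one 0 _).map (add_right_injective c)

-- === the A-side loop body and its normal form ===
def pvMainA (I K : Int) (st : List (List Int) × PySem.Dict Int Int × PySem.Dict Int Int)
    (index_filter : Int) : List (List Int) × PySem.Dict Int Int × PySem.Dict Int Int :=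
  let b1 := pvPQNNBrick (K * index_filter) K
              (index_filter * (PySem.Int.floordiv (K * (K - 1)) 2)) 0
  let b2 := pvPQNNBrick (I + K * index_filter) K
              ((PySem.Int.floordiv I K + index_filter) * (PySem.Int.floordiv (K * (K - 1)) 2))
              (PySem.Int.floordiv (K * (K - 1)) 2)
  let rbs := (st.2.2.update b1.2.1.items).update b2.2.1.items
  let par := (st.2.1.update b1.1.items).update b2.1.items
  let qnn :=
    (PySem.List.pyRange 0 (2 * K - 3) 1).foldl
      (fun Q inner =>
        (PySem.List.pyRange 0 (((PySem.List.pyGetD b1.2.2 inner []).length : Int)) 1).foldl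
          (fun Q e =>
            let Q := PySem.List.pySetD Q inner
              (PySem.List.pyGetD Q inner [] ++
                [PySem.List.pyGetD (PySem.List.pyGetD b1.2.2 inner []) e 0])
            PySem.List.pySetD Q inner
              (PySem.List.pyGetD Q inner [] ++
                [PySem.List.pyGetD (PySem.List.pyGetD b2.2.2 inner []) e 0]))
          Q)
      st.1
  (qnn, par, rbs)

def pvG (K : Int) : Int := PySem.Int.floordiv (K * (K - 1)) 2
def pvHalf (I K : Int) : Int := PySem.Int.floordiv I K
def pvFlat (K : Int) : List Int := (pvAltRows K).flatten
def pvLns (K : Int) : List Nat := pvLens (pvAltRows K)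

def pvQstep (I K : Int) (Q : List (List Int)) (f : Int) : List (List Int) :=
  pvAppendBlocks Q 0 (pvBlocks (f * pvG K) ((pvHalf I K + f) * pvG K) 0 (pvLns K))

def pvPstep (I K : Int) (P : PySem.Dict Int Int) (f : Int) : PySem.Dict Int Int :=
  pvIns (pvIns P ((PySem.List.enumerate (pvFlat K) 0).map
          (fun p => (f * pvG K + p.1, p.1))))
        ((PySem.List.enumerate (pvFlat K) 0).map
          (fun p => ((pvHalf I K + f) * pvG K + p.1, pvG K + p.1)))

def pvRstep (I K : Int) (R : PySem.Dict Int Int) (f : Int) : PySem.Dict Int Int :=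
  pvIns (pvIns R ((PySem.List.enumerate (pvFlat K) 0).map
          (fun p => (f * pvG K + p.1, K * f + p.2))))
        ((PySem.List.enumerate (pvFlat K) 0).map
          (fun p => ((pvHalf I K + f) * pvG K + p.1, I + K * f + p.2)))

theorem pvUpdateIns (d : PySem.Dict Int Int) (ps : List (Int × Int)) :
    d.update ps = pvIns d ps := rfl

theorem pvHrg (K : Int) : PySem.List.pyRange 0 (2 * K - 3) 1
    = PySem.List.pyRange 0 ((pvLns K).length : Int) 1 := by
  have hll : ((pvLns K).length : Int) = max (2 * K - 3) 0 := by
    rw [show (pvLns K).length = (pvAltRows K).length by simp [pvLns, pvLens]]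
    exact pvAltRows_len K
  by_cases h : 0 ≤ 2 * K - 3
  · rw [hll, show max (2 * K - 3) 0 = 2 * K - 3 by omega]
  · rw [PySem.List.pyRange_one_eq_nil (by omega),
        PySem.List.pyRange_one_eq_nil (by rw [hll]; omega)]

theorem pvStepNorm (I K : Int) (st : List (List Int) × PySem.Dict Int Int × PySem.Dict Int Int)
    (f : Int) :
    pvMainA I K st f = (pvQstep I K st.1 f, pvPstep I K st.2.1 f, pvRstep I K st.2.2 f) := by
  obtain ⟨Q, P, R⟩ := st
  simp only [pvMainA, pvBrick, pvHrg K, pvUpdateIns]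
  rw [pvItemsIns _ (pvPairsNodup _ _ _), pvItemsIns _ (pvPairsNodup _ _ _),
      pvItemsIns _ (pvPairsNodup _ _ _), pvItemsIns _ (pvPairsNodup _ _ _)]
  rw [show pvLens (pvAltRows K) = pvLns K from rfl,
      show (pvAltRows K).flatten = pvFlat K from rfl]
  rw [pvAOuter _ _ (pvLns K) Q]
  simp only [pvQstep, pvPstep, pvRstep, pvG, pvHalf, Prod.mk.injEq]
  refine ⟨trivial, ?_, trivial⟩
  have hm : List.map (fun p : Int × Int =>
        (f * PySem.Int.floordiv (K * (K - 1)) 2 + p.1, 0 + p.1))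
        (PySem.List.enumerate (pvFlat K) 0)
      = List.map (fun p : Int × Int =>
        (f * PySem.Int.floordiv (K * (K - 1)) 2 + p.1, p.1))
        (PySem.List.enumerate (pvFlat K) 0) :=
    List.map_congr_left (fun p _ => by rw [zero_add])
  rw [hm]

theorem pvTripleSplit {α β γ : Type} (L : List Int) (q : α → Int → α) (p : β → Int → β)
    (r : γ → Int → γ) (a : α) (b : β) (c : γ) :
    L.foldl (fun st f => (q st.1 f, p st.2.1 f, r st.2.2 f)) (a, b, c)
      = (L.foldl q a, L.foldl p b, L.foldl r c) := by
  induction L generalizing a b c with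
  | nil => rfl
  | cons x xs ih => simp [List.foldl_cons, ih]

-- === closed-form description of the pyramid rows (bridge to B) ===
def pvAscRow (li : Int) : List Int :=
  (PySem.List.pyRange 0 (PySem.Int.floordiv li 2 + 1) 1).map
    (fun j => 2 * j + PySem.Int.mod li 2)

theorem pvBodyB_eq (K : Int) (acc : List (List Int)) (i : Int) :
    pvBodyB K acc i = acc ++ (if 2 * i < K - 1 then [pvAscRow (2 * i)] else [])
      ++ (if 2 * i + 1 < K - 1 then [pvAscRow (2 * i + 1)] else []) := by
  have hfe : PySem.Int.floordiv (2 * i) 2 = i := by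
    rw [PySem.Int.floordiv_eq_ediv_of_pos (by norm_num)]; omega
  have hfo : PySem.Int.floordiv (2 * i + 1) 2 = i := by
    rw [PySem.Int.floordiv_eq_ediv_of_pos (by norm_num)]; omega
  have hme : PySem.Int.mod (2 * i) 2 = 0 := by
    rw [PySem.Int.mod_eq_emod_of_pos (by norm_num)]; omega
  have hmo : PySem.Int.mod (2 * i + 1) 2 = 1 := by
    rw [PySem.Int.mod_eq_emod_of_pos (by norm_num)]; omega
  have he : pvAscRow (2 * i) = (PySem.List.pyRange 0 (i + 1) 1).map (fun j => 2 * j) := by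
    rw [pvAscRow, hfe, hme]
    exact List.map_congr_left (fun x _ => by ring)
  have ho : pvAscRow (2 * i + 1) = (PySem.List.pyRange 0 (i + 1) 1).map (fun j => 2 * j + 1) := by
    rw [pvAscRow, hfo, hmo]
  rw [he, ho, pvBodyB]
  split_ifs <;> simp [List.append_assoc]

theorem pvAscCF (K : Int) (hK : 1 ≤ K) (M : Nat) :
    (PySem.List.pyRange 0 (M : Int) 1).foldl (pvBodyB K) []
      = (PySem.List.pyRange 0 (min (2 * (M : Int)) (K - 1)) 1).map pvAscRow := by
  induction M with
  | zero =>
    rw [show ((0 : Nat) : Int) = 0 from rfl, PySem.List.pyRange_one_eq_nil (by omega),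
        PySem.List.pyRange_one_eq_nil (by omega)]
    rfl
  | succ M ih =>
    have hc : ((M + 1 : Nat) : Int) = (M : Int) + 1 := by push_cast; ring
    rw [hc, PySem.List.pyRange_one_succ_right (by omega), List.foldl_append]
    simp only [List.foldl_cons, List.foldl_nil]
    rw [ih, pvBodyB_eq]
    by_cases c2 : 2 * (M : Int) + 1 < K - 1
    · have c1 : 2 * (M : Int) < K - 1 := by omega
      rw [if_pos c1, if_pos c2,
          show min (2 * (M : Int)) (K - 1) = 2 * (M : Int) from by omega,
          show min (2 * ((M : Int) + 1)) (K - 1) = 2 * (M : Int) + 1 + 1 from by omega,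
          PySem.List.pyRange_one_succ_right (by omega),
          PySem.List.pyRange_one_succ_right (by omega)]
      simp [List.append_assoc]
    · by_cases c1 : 2 * (M : Int) < K - 1
      · rw [if_pos c1, if_neg c2,
            show min (2 * (M : Int)) (K - 1) = 2 * (M : Int) from by omega,
            show min (2 * ((M : Int) + 1)) (K - 1) = 2 * (M : Int) + 1 from by omega,
            PySem.List.pyRange_one_succ_right (by omega)]
        simp
      · rw [if_neg c1, if_neg c2,
            show min (2 * ((M : Int) + 1)) (K - 1) = min (2 * (M : Int)) (K - 1) from by omega]
        simp

theorem pvAltAscCF (K : Int) (hK : 1 ≤ K) :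
    pvAltAsc K = (PySem.List.pyRange 0 (K - 1) 1).map pvAscRow := by
  rw [pvAltAsc]
  have h2 : PySem.Int.floordiv K 2 = K / 2 := PySem.Int.floordiv_eq_ediv_of_pos (by norm_num)
  have hM : ((K / 2).toNat : Int) = K / 2 := by omega
  rw [h2, show K / 2 = (((K / 2).toNat : Nat) : Int) from hM.symm, pvAscCF K hK]
  rw [show min (2 * (((K / 2).toNat : Nat) : Int)) (K - 1) = K - 1 from by omega]

theorem pvReflect (N : Nat) : ∀ (a c : Int) (g : Int → List Int),
    (PySem.List.pyRange a (a + (N : Int)) 1).map (fun x => g (c - x))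
      = ((PySem.List.pyRange (c - a - (N : Int) + 1) (c - a + 1) 1).map g).reverse := by
  induction N with
  | zero =>
    intro a c g
    rw [PySem.List.pyRange_one_eq_nil (by omega), PySem.List.pyRange_one_eq_nil (by omega)]
    rfl
  | succ N ih =>
    intro a c g
    have hc : a + ((N + 1 : Nat) : Int) = (a + (N : Int)) + 1 := by push_cast; ring
    rw [hc, PySem.List.pyRange_one_succ_right (by omega), List.map_append, ih a c g]
    rw [show c - a - ((N + 1 : Nat) : Int) + 1 = c - a - (N : Int) from by push_cast; ring]
    rw [PySem.List.pyRange_one_cons (show c - a - (N : Int) < c - a + 1 from by omega)]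
    simp only [List.map_cons, List.map_nil, List.reverse_cons]
    rw [show c - (a + (N : Int)) = c - a - (N : Int) from by ring]

theorem pvRowsCF (K : Int) :
    pvAltRows K = (PySem.List.pyRange 0 (2 * K - 3) 1).map
      (fun li => pvAscRow (min li (2 * K - 4 - li))) := by
  by_cases hK : 2 ≤ K
  · have hasc := pvAltAscCF K (by omega)
    rw [PySem.List.pyRange_one_append 0 (K - 1) (2 * K - 3) (by omega) (by omega),
        List.map_append]
    have hpart1 : (PySem.List.pyRange 0 (K - 1) 1).map
        (fun li => pvAscRow (min li (2 * K - 4 - li)))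
        = (PySem.List.pyRange 0 (K - 1) 1).map pvAscRow := by
      refine List.map_congr_left (fun li hli => ?_)
      obtain ⟨h0, h1⟩ := PySem.List.mem_pyRange_one.1 hli
      rw [show min li (2 * K - 4 - li) = li from by omega]
    have hpart2 : (PySem.List.pyRange (K - 1) (2 * K - 3) 1).map
        (fun li => pvAscRow (min li (2 * K - 4 - li)))
        = ((PySem.List.pyRange 0 (K - 2) 1).map pvAscRow).reverse := by
      rw [List.map_congr_left (l := PySem.List.pyRange (K - 1) (2 * K - 3) 1)
            (f := fun li => pvAscRow (min li (2 * K - 4 - li)))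
            (g := fun li => pvAscRow ((2 * K - 4) - li))
            (fun li hli => by
              obtain ⟨h0, h1⟩ := PySem.List.mem_pyRange_one.1 hli
              show pvAscRow (min li (2 * K - 4 - li)) = pvAscRow (2 * K - 4 - li)
              rw [show min li (2 * K - 4 - li) = 2 * K - 4 - li from by omega])]
      have hsplit : (2 * K - 3) = (K - 1) + (((K - 2).toNat : Nat) : Int) := by omega
      rw [hsplit, pvReflect ((K - 2).toNat) (K - 1) (2 * K - 4) pvAscRow]
      rw [show 2 * K - 4 - (K - 1) - (((K - 2).toNat : Nat) : Int) + 1 = 0 from by omega,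
          show 2 * K - 4 - (K - 1) + 1 = K - 2 from by omega]
    rw [hpart1, hpart2, ← hasc, pvAltRows]
    have hdl : (pvAltAsc K).dropLast = (PySem.List.pyRange 0 (K - 2) 1).map pvAscRow := by
      rw [hasc, show K - 1 = (K - 2) + 1 from by ring,
          PySem.List.pyRange_one_succ_right (by omega), List.map_append]
      simp
    rw [hdl]
  · rw [pvAltRows, pvAltAsc_nil K (by omega), PySem.List.pyRange_one_eq_nil (by omega)]
    rfl

-- === B-side normal form ===
def pvLayersFrom (K s : Int) : List Int → List (Int × Int × Int)
  | [] => []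
  | li :: t =>
      (s, PySem.Int.floordiv (min li (2 * K - 4 - li)) 2 + 1,
          PySem.Int.mod (min li (2 * K - 4 - li)) 2)
        :: pvLayersFrom K (s + (PySem.Int.floordiv (min li (2 * K - 4 - li)) 2 + 1)) t

theorem pvLayersFoldAux (K : Int) (lis : List Int) :
    ∀ (acc : List (Int × Int × Int)) (s : Int),
    lis.foldl
      (fun (t : List (Int × Int × Int) × Int) li =>
        let m := min li (2 * K - 4 - li)
        (t.1 ++ [(t.2, PySem.Int.floordiv m 2 + 1, PySem.Int.mod m 2)],
         t.2 + (PySem.Int.floordiv m 2 + 1)))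
      (acc, s)
    = (acc ++ pvLayersFrom K s lis,
       s + (((pvLayersFrom K s lis).map (fun slp => slp.2.1)).sum)) := by
  induction lis with
  | nil => intro acc s; simp [pvLayersFrom]
  | cons li t ih =>
    intro acc s
    simp only [List.foldl_cons, ih, pvLayersFrom, List.map_cons, List.sum_cons,
      List.append_assoc, List.singleton_append, Prod.mk.injEq]
    exact ⟨trivial, by ring⟩

theorem pvAltLayers_eq (K : Int) :
    pvAltLayers K = pvLayersFrom K 0 (PySem.List.pyRange 0 (2 * K - 3) 1) := by
  rw [pvAltLayers, pvLayersFoldAux]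
  simp

theorem pvLayersLen (K : Int) : ∀ (s : Int) (lis : List Int),
    (pvLayersFrom K s lis).length = lis.length := by
  intro s lis
  induction lis generalizing s with
  | nil => rfl
  | cons li t ih => simp [pvLayersFrom, ih]

theorem pvLayersMem (K : Int) : ∀ (lis : List Int) (s : Int) (slp : Int × Int × Int),
    slp ∈ pvLayersFrom K s lis → ∃ li ∈ lis,
      slp.2.1 = PySem.Int.floordiv (min li (2 * K - 4 - li)) 2 + 1 ∧
      slp.2.2 = PySem.Int.mod (min li (2 * K - 4 - li)) 2 := by
  intro lis
  induction lis with
  | nil => intro s slp h; simp [pvLayersFrom] at h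
  | cons li t ih =>
    intro s slp h
    rw [pvLayersFrom, List.mem_cons] at h
    rcases h with h | h
    · exact ⟨li, by simp, by rw [h], by rw [h]⟩
    · obtain ⟨li', hmem, h1, h2⟩ := ih _ _ h
      exact ⟨li', by simp [hmem], h1, h2⟩

theorem pvLayersRows (K : Int) : ∀ (lis : List Int) (s : Int),
    (pvLayersFrom K s lis).map
        (fun slp => (PySem.List.pyRange 0 slp.2.1 1).map (fun e => 2 * e + slp.2.2))
      = lis.map (fun li => pvAscRow (min li (2 * K - 4 - li))) := by
  intro lis
  induction lis with
  | nil => intro s; rfl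
  | cons li t ih =>
    intro s
    simp only [pvLayersFrom, List.map_cons, ih, pvAscRow]

theorem pvMlenPos (K : Int) (li : Int) (h0 : 0 ≤ li) (h1 : li < 2 * K - 3) :
    0 ≤ PySem.Int.floordiv (min li (2 * K - 4 - li)) 2 + 1 := by
  rw [PySem.Int.floordiv_eq_ediv_of_pos (by norm_num)]
  omega

theorem pvLnsCF (K : Int) :
    pvLns K = (PySem.List.pyRange 0 (2 * K - 3) 1).map
      (fun li => (PySem.Int.floordiv (min li (2 * K - 4 - li)) 2 + 1).toNat) := by
  rw [pvLns, pvLens, pvRowsCF, List.map_map]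
  refine List.map_congr_left (fun li hli => ?_)
  simp only [Function.comp_apply, pvAscRow, List.length_map, PySem.List.length_pyRange_one]
  omega

theorem pvBlocksLayers (K b1 b2 : Int) : ∀ (lis : List Int) (s : Int),
    (∀ li ∈ lis, 0 ≤ PySem.Int.floordiv (min li (2 * K - 4 - li)) 2 + 1) →
    pvBlocks b1 b2 s (lis.map (fun li => (PySem.Int.floordiv (min li (2 * K - 4 - li)) 2 + 1).toNat))
      = (pvLayersFrom K s lis).map
          (fun slp => (PySem.List.pyRange slp.1 (slp.1 + slp.2.1) 1).flatMap
            (fun r => [b1 + r, b2 + r])) := by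
  intro lis
  induction lis with
  | nil => intro s _; rfl
  | cons li t ih =>
    intro s hpos
    have h0 : (((PySem.Int.floordiv (min li (2 * K - 4 - li)) 2 + 1).toNat : Nat) : Int)
        = PySem.Int.floordiv (min li (2 * K - 4 - li)) 2 + 1 := by
      have := hpos li (by simp)
      omega
    simp only [List.map_cons, pvBlocks, pvLayersFrom, List.map_cons, h0]
    rw [ih _ (fun x hx => hpos x (by simp [hx]))]

theorem pvBlocksCF (I K f : Int) :
    pvBlocks (f * pvG K) ((pvHalf I K + f) * pvG K) 0 (pvLns K)
      = (pvAltLayers K).map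
          (fun slp => (PySem.List.pyRange slp.1 (slp.1 + slp.2.1) 1).flatMap
            (fun r => [f * pvG K + r, (pvHalf I K + f) * pvG K + r])) := by
  rw [pvLnsCF, pvAltLayers_eq,
      pvBlocksLayers K _ _ _ 0
        (fun li hli => by
          obtain ⟨h0, h1⟩ := PySem.List.mem_pyRange_one.1 hli
          exact pvMlenPos K li h0 h1)]

theorem pvFlatCF (K : Int) :
    pvFlat K = (pvAltLayers K).flatMap
      (fun slp => (PySem.List.pyRange 0 slp.2.1 1).map (fun e => 2 * e + slp.2.2)) := by
  rw [pvFlat, pvRowsCF, pvAltLayers_eq, List.flatMap_def, pvLayersRows]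

-- === zip/exchange lemmas for the QNN layers ===
theorem pvSetConcat (xs : List (List Int)) (q : List Int) (Q' : List (List Int)) (v : List Int) :
    (xs ++ q :: Q').set xs.length v = xs ++ v :: Q' := by
  induction xs with
  | nil => rfl
  | cons x t ih => simp [List.set_cons_succ, ih]

theorem pvGetDConcat (xs : List (List Int)) (q : List Int) (Q' : List (List Int)) :
    (xs ++ q :: Q').getD xs.length [] = q := by
  induction xs with
  | nil => rfl
  | cons x t ih => simpa using ih

theorem pvAppendAtConcat (xs : List (List Int)) (q : List Int) (Q' : List (List Int))
    (b : List Int) :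
    pvAppendAt (xs ++ q :: Q') ((xs.length : Nat) : Int) b = xs ++ (q ++ b) :: Q' := by
  rw [pvAppendAt_toNat _ _ _ (by omega), Int.toNat_natCast, pvGetDConcat, pvSetConcat]

theorem pvAppendBlocksZip : ∀ (bs Q : List (List Int)), bs.length = Q.length →
    ∀ (xs : List (List Int)),
    pvAppendBlocks (xs ++ Q) ((xs.length : Nat) : Int) bs
      = xs ++ List.zipWith (· ++ ·) Q bs := by
  intro bs
  induction bs with
  | nil =>
    intro Q hl xs
    have : Q = [] := List.eq_nil_of_length_eq_zero hl.symm
    subst this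
    simp [pvAppendBlocks]
  | cons b bs' ih =>
    intro Q hl xs
    cases Q with
    | nil => simp at hl
    | cons q Q' =>
      simp only [pvAppendBlocks, pvAppendAtConcat]
      have hc : ((xs.length : Nat) : Int) + 1 = (((xs ++ [q ++ b]).length : Nat) : Int) := by
        simp
      rw [hc, show xs ++ (q ++ b) :: Q' = (xs ++ [q ++ b]) ++ Q' from by simp,
          ih Q' (by simpa using hl) (xs ++ [q ++ b])]
      simp

theorem pvZipMapMap {α : Type} (L : List α) (g h : α → List Int) :
    List.zipWith (· ++ ·) (L.map g) (L.map h) = L.map (fun a => g a ++ h a) := by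
  induction L with
  | nil => rfl
  | cons x t ih => simp [ih]

theorem pvFoldBlocksMap {α : Type} (Fs : List Int) (Layers : List α) :
    ∀ (g : α → List Int) (h : Int → α → List Int),
    Fs.foldl (fun Q f => pvAppendBlocks Q 0 (Layers.map (h f))) (Layers.map g)
      = Layers.map (fun a => g a ++ Fs.flatMap (fun f => h f a)) := by
  induction Fs with
  | nil =>
    intro g h
    simp
  | cons f Fs' ih =>
    intro g h
    simp only [List.foldl_cons]
    have hz := pvAppendBlocksZip (Layers.map (h f)) (Layers.map g) (by simp) []
    simp only [List.nil_append, List.length_nil, Nat.cast_zero] at hz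
    rw [hz, pvZipMapMap, ih (fun a => g a ++ h f a) h]
    refine List.map_congr_left (fun a _ => ?_)
    simp [List.append_assoc]

-- === B-side loop body and equality of the dictionary step ===
def pvMainBD (I K : Int) (d : PySem.Dict Int Int × PySem.Dict Int Int) (f : Int) :
    PySem.Dict Int Int × PySem.Dict Int Int :=
  let d1 := (PySem.List.enumerate (pvFlat K) 0).foldl
    (fun d p => (d.1.insert (f * pvG K + p.1) p.1,
                 d.2.insert (f * pvG K + p.1) (K * f + p.2))) d
  (PySem.List.enumerate (pvFlat K) 0).foldl
    (fun d p => (d.1.insert ((pvHalf I K + f) * pvG K + p.1) (pvG K + p.1),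
                 d.2.insert ((pvHalf I K + f) * pvG K + p.1) (I + K * f + p.2))) d1

theorem pvBstepEq (I K : Int) (d : PySem.Dict Int Int × PySem.Dict Int Int) (f : Int) :
    pvMainBD I K d f = (pvPstep I K d.1 f, pvRstep I K d.2 f) := by
  obtain ⟨P, R⟩ := d
  simp only [pvMainBD]
  rw [pvFoldPairSplit _
        (fun (d : PySem.Dict Int Int) (p : Int × Int) => d.insert (f * pvG K + p.1) p.1)
        (fun (d : PySem.Dict Int Int) (p : Int × Int) => d.insert (f * pvG K + p.1) (K * f + p.2))
        P R,
      pvFoldPairSplit _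
        (fun (d : PySem.Dict Int Int) (p : Int × Int) =>
          d.insert ((pvHalf I K + f) * pvG K + p.1) (pvG K + p.1))
        (fun (d : PySem.Dict Int Int) (p : Int × Int) =>
          d.insert ((pvHalf I K + f) * pvG K + p.1) (I + K * f + p.2)) _ _]
  simp only [pvPstep, pvRstep, pvInsMap]

theorem pvFinal (I K : Int) : QCNN_RBS_based_VQC I K = QCNN_RBS_based_VQC_alt I K := by
  have hA : QCNN_RBS_based_VQC I K =
      (let fin := (PySem.List.pyRange 0 (PySem.Int.floordiv (I - K) K + 1) 1).foldl
         (pvMainA I K)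
         ((PySem.List.pyRange 0 (2 * K - 3) 1).map (fun _ => []),
          PySem.Dict.empty, PySem.Dict.empty)
       (fin.1, fin.2.1.items, fin.2.2.items)) := rfl
  have hB : QCNN_RBS_based_VQC_alt I K =
      ((pvAltLayers K).map (fun slp =>
         (PySem.List.pyRange 0 (PySem.Int.floordiv (I - K) K + 1) 1).flatMap (fun f =>
           (PySem.List.pyRange 0 slp.2.1 1).flatMap (fun e =>
             [f * pvG K + slp.1 + e, (pvHalf I K + f) * pvG K + slp.1 + e]))),
       ((if 0 < PySem.Int.floordiv (I - K) K + 1 then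
          (PySem.List.pyRange 0 (PySem.Int.floordiv (I - K) K + 1) 1).foldl
          (fun d f =>
            let d1 := (PySem.List.enumerate ((pvAltLayers K).flatMap (fun slp =>
                (PySem.List.pyRange 0 slp.2.1 1).map (fun e => 2 * e + slp.2.2))) 0).foldl
              (fun d p => (d.1.insert (f * pvG K + p.1) p.1,
                           d.2.insert (f * pvG K + p.1) (K * f + p.2))) d
            (PySem.List.enumerate ((pvAltLayers K).flatMap (fun slp =>
                (PySem.List.pyRange 0 slp.2.1 1).map (fun e => 2 * e + slp.2.2))) 0).foldl
              (fun d p => (d.1.insert ((pvHalf I K + f) * pvG K + p.1) (pvG K + p.1),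
                           d.2.insert ((pvHalf I K + f) * pvG K + p.1) (I + K * f + p.2))) d1)
          (PySem.Dict.empty, PySem.Dict.empty)
         else (PySem.Dict.empty, PySem.Dict.empty)).1.items,
        (if 0 < PySem.Int.floordiv (I - K) K + 1 then
          (PySem.List.pyRange 0 (PySem.Int.floordiv (I - K) K + 1) 1).foldl
          (fun d f =>
            let d1 := (PySem.List.enumerate ((pvAltLayers K).flatMap (fun slp =>
                (PySem.List.pyRange 0 slp.2.1 1).map (fun e => 2 * e + slp.2.2))) 0).foldl
              (fun d p => (d.1.insert (f * pvG K + p.1) p.1,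
                           d.2.insert (f * pvG K + p.1) (K * f + p.2))) d
            (PySem.List.enumerate ((pvAltLayers K).flatMap (fun slp =>
                (PySem.List.pyRange 0 slp.2.1 1).map (fun e => 2 * e + slp.2.2))) 0).foldl
              (fun d p => (d.1.insert ((pvHalf I K + f) * pvG K + p.1) (pvG K + p.1),
                           d.2.insert ((pvHalf I K + f) * pvG K + p.1) (I + K * f + p.2))) d1)
          (PySem.Dict.empty, PySem.Dict.empty)
         else (PySem.Dict.empty, PySem.Dict.empty)).2.items)) := rfl
  rw [hA, hB]
  have hQ0 : (PySem.List.pyRange 0 (2 * K - 3) 1).map (fun _ => ([] : List Int))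
      = (pvAltLayers K).map (fun _ => ([] : List Int)) := by
    apply List.ext_getElem
    · simp only [List.length_map, pvAltLayers_eq, pvLayersLen]
    · intro n h1 h2; simp
  -- normalize A's fold
  rw [pvFoldlCongrInv _ (pvMainA I K)
        (fun st f => (pvQstep I K st.1 f, pvPstep I K st.2.1 f, pvRstep I K st.2.2 f))
        _ (fun a b _ => pvStepNorm I K a b),
      pvTripleSplit]
  by_cases hF : 0 < PySem.Int.floordiv (I - K) K + 1
  case neg =>
    have hnil : PySem.List.pyRange 0 (PySem.Int.floordiv (I - K) K + 1) 1 = [] :=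
      PySem.List.pyRange_one_eq_nil (by omega)
    simp only [if_neg hF, hnil, List.foldl_nil, List.flatMap_nil, hQ0]
  simp only [if_pos hF]
  -- normalize B's dictionary fold
  rw [show (fun (d : PySem.Dict Int Int × PySem.Dict Int Int) (f : Int) =>
        let d1 := (PySem.List.enumerate ((pvAltLayers K).flatMap (fun slp =>
            (PySem.List.pyRange 0 slp.2.1 1).map (fun e => 2 * e + slp.2.2))) 0).foldl
          (fun d p => (d.1.insert (f * pvG K + p.1) p.1,
                       d.2.insert (f * pvG K + p.1) (K * f + p.2))) d
        (PySem.List.enumerate ((pvAltLayers K).flatMap (fun slp =>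
            (PySem.List.pyRange 0 slp.2.1 1).map (fun e => 2 * e + slp.2.2))) 0).foldl
          (fun d p => (d.1.insert ((pvHalf I K + f) * pvG K + p.1) (pvG K + p.1),
                       d.2.insert ((pvHalf I K + f) * pvG K + p.1) (I + K * f + p.2))) d1)
      = pvMainBD I K from by
        funext d f
        rw [pvMainBD, pvFlatCF]]
  rw [pvFoldlCongrInv _ (pvMainBD I K)
        (fun d f => (pvPstep I K d.1 f, pvRstep I K d.2 f))
        _ (fun a b _ => pvBstepEq I K a b),
      pvFoldPairSplit]
  -- QNN layers
  refine congrArg (fun Q => (Q, _, _)) ?_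
  rw [hQ0]
  rw [pvFoldlCongrInv _ (pvQstep I K)
        (fun Q f => pvAppendBlocks Q 0 ((pvAltLayers K).map
          (fun slp => (PySem.List.pyRange slp.1 (slp.1 + slp.2.1) 1).flatMap
            (fun r => [f * pvG K + r, (pvHalf I K + f) * pvG K + r]))))
        _ (fun Q f _ => by rw [pvQstep, pvBlocksCF]),
      pvFoldBlocksMap]
  refine List.map_congr_left (fun slp hmem => ?_)
  rw [List.nil_append]
  congr 1
  funext f
  obtain ⟨li, hli, hlen, hpar⟩ := pvLayersMem K _ _ slp (by rw [← pvAltLayers_eq]; exact hmem)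
  obtain ⟨h0, h1⟩ := PySem.List.mem_pyRange_one.1 hli
  have hpos : 0 ≤ slp.2.1 := by rw [hlen]; exact pvMlenPos K li h0 h1
  have hcast : slp.2.1 = ((slp.2.1.toNat : Nat) : Int) := by omega
  rw [hcast, ← pvShiftBlock (f * pvG K) ((pvHalf I K + f) * pvG K) slp.1 slp.2.1.toNat]

-- ===== VERDICT (by name: the statement is the Claim_ definition above) =====
theorem QCNN_RBS_based_VQC_spec : Claim_equal_QCNN_RBS_based_VQC := by
  intro I K _ _
  show QCNN_RBS_based_VQC I K = QCNN_RBS_based_VQC_alt I K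
  exact pvFinal I K
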